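-- pv_equiv track=rewrite | github.com/joaquinparodi/TDA-greedy-algorithms | greedy_algorithm.py | obtener_orden_y_tiempo_optimo_de_videos
-- ===== SOURCE A (Python) =====
-- def obtener_orden_y_tiempo_optimo_de_videos(tiempos: list[tuple[int, int]]):
--     orden_optimo = sorted(tiempos, key=lambda tiempo: tiempo[1], reverse=True)
--
--     finalizacion_anterior_scaloni = 0
--     finalizacion_anterior_ayudante = 0
--
--     for tiempo_scaloni, tiempo_ayudante in orden_optimo:
--         finalizacion_scaloni = finalizacion_anterior_scaloni + tiempo_scaloni
--         finalizacion_ayudante = finalizacion_scaloni + tiempo_ayudante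
--
--         finalizacion_anterior_scaloni = finalizacion_scaloni
--
--         if finalizacion_anterior_ayudante < finalizacion_ayudante:
--             finalizacion_anterior_ayudante = finalizacion_ayudante
--
--     return orden_optimo, finalizacion_anterior_ayudante
-- ===== SOURCE B (Python) =====
-- def obtener_orden_y_tiempo_optimo_de_videos(tiempos: list[tuple[int, int]]):
--     orden_optimo = sorted(tiempos, key=lambda tiempo: tiempo[1], reverse=True)
--
--     # Backward pass: `mejor` is the best helper-finish time of the suffix seen so
--     # far, assuming the suffix starts at time 0 (None for the empty suffix).
--     # Recurrence: prepending (s, a) gives max(s + a, s + mejor).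
--     mejor = None
--     for tiempo_scaloni, tiempo_ayudante in reversed(orden_optimo):
--         if mejor is None:
--             mejor = tiempo_scaloni + tiempo_ayudante
--         else:
--             mejor = max(tiempo_scaloni + tiempo_ayudante, tiempo_scaloni + mejor)
--
--     return orden_optimo, (0 if mejor is None else max(mejor, 0))
-- ===== Notes on version B (the rewrite author's own statement) =====
-- stated objective: alternative
-- what changed: Replaces A's forward pass carrying two running accumulators (prefix sum of first components and running max of helper-finish times) by a single backward pass over the sorted list maintaining one optional value: the best helper-finish time of the suffix assuming it starts at time 0, combined by mejor = max(s+a, s+mejor), clamped at 0 at the end.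
import Mathlib
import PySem

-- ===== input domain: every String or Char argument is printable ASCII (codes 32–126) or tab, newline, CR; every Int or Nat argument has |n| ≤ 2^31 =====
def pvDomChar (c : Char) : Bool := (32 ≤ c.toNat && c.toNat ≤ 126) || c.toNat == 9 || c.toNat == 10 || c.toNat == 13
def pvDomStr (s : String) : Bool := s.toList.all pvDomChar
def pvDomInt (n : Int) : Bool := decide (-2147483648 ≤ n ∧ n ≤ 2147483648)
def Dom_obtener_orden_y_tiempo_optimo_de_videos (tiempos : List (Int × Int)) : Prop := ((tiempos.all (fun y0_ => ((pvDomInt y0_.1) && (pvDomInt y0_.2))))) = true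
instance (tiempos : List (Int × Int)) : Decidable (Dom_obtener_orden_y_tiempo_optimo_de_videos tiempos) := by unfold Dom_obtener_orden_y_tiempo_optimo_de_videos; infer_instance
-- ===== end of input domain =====

-- B replaces A's forward pass with two running accumulators by a single backward pass
-- maintaining the optional best helper-finish time of the suffix (alternative decomposition, same cost).

-- ===== PORT A =====
-- A's for-loop: state = (finalizacion_anterior_scaloni, finalizacion_anterior_ayudante)
def pvALoop : List (Int × Int) → Int → Int → Int
  | [], _, fa => fa
  | (ts, ta) :: rest, fs, fa =>
      let fsc := fs + ts
      let fay := fsc + ta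
      pvALoop rest fsc (if fa < fay then fay else fa)

def obtener_orden_y_tiempo_optimo_de_videos (tiempos : List (Int × Int)) : (List (Int × Int)) × Int :=
  let orden_optimo := PySem.List.sorted tiempos (fun tiempo => tiempo.2) (reverse := true)
  (orden_optimo, pvALoop orden_optimo 0 0)

-- ===== PORT B =====
-- Source B's backward for-loop over reversed(orden_optimo), state `mejor : Option Int`
def pvBStep (mejor : Option Int) (p : Int × Int) : Option Int :=
  match mejor with
  | none => some (p.1 + p.2)
  | some m => some (max (p.1 + p.2) (p.1 + m))

def obtener_orden_y_tiempo_optimo_de_videos_alt (tiempos : List (Int × Int)) : (List (Int × Int)) × Int :=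
  let orden_optimo := PySem.List.sorted tiempos (fun tiempo => tiempo.2) (reverse := true)
  let mejor := orden_optimo.reverse.foldl pvBStep none
  (orden_optimo, match mejor with | none => 0 | some m => max m 0)

-- ===== PRECONDITION & SPEC =====
def Spec_obtener_orden_y_tiempo_optimo_de_videos (tiempos : List (Int × Int)) (out : (List (Int × Int)) × Int) : Prop := out = obtener_orden_y_tiempo_optimo_de_videos_alt tiempos
instance (tiempos : List (Int × Int)) (out : (List (Int × Int)) × Int) : Decidable (Spec_obtener_orden_y_tiempo_optimo_de_videos tiempos out) := by unfold Spec_obtener_orden_y_tiempo_optimo_de_videos; infer_instance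

-- ===== CLAIM (what is proved, stated in full; the proofs are below) =====
def Claim_equal_obtener_orden_y_tiempo_optimo_de_videos : Prop := ∀ (tiempos : List (Int × Int)), Dom_obtener_orden_y_tiempo_optimo_de_videos tiempos → Spec_obtener_orden_y_tiempo_optimo_de_videos tiempos (obtener_orden_y_tiempo_optimo_de_videos tiempos)

-- ===== LEMMAS AND PROOFS =====

-- the backward fold written as a structural recursion on the (un-reversed) list
def pvG : List (Int × Int) → Option Int
  | [] => none
  | p :: rest => pvBStep (pvG rest) p

theorem pvG_eq_foldl (l : List (Int × Int)) :
    l.reverse.foldl pvBStep none = pvG l := by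
  induction l with
  | nil => rfl
  | cons p rest ih => simp [pvG, List.foldl_append, ih]

theorem pvALoop_eq_pvG (l : List (Int × Int)) (fs fa : Int) :
    pvALoop l fs fa = match pvG l with | none => fa | some m => max fa (fs + m) := by
  induction l generalizing fs fa with
  | nil => rfl
  | cons p rest ih =>
      obtain ⟨ts, ta⟩ := p
      simp only [pvALoop, pvG, ih]
      cases h : pvG rest <;>
        simp only [pvBStep, max_def] <;> split_ifs <;> (try rfl) <;> linarith

-- ===== VERDICT (by name: the statement is the Claim_ definition above) =====
theorem obtener_orden_y_tiempo_optimo_de_videos_spec : Claim_equal_obtener_orden_y_tiempo_optimo_de_videos := by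
  intro tiempos _
  unfold Spec_obtener_orden_y_tiempo_optimo_de_videos
  unfold obtener_orden_y_tiempo_optimo_de_videos obtener_orden_y_tiempo_optimo_de_videos_alt
  simp only [pvG_eq_foldl, pvALoop_eq_pvG]
  cases pvG (PySem.List.sorted tiempos (fun t => t.2) (reverse := true)) with
  | none => rfl
  | some m => simp [max_comm]
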